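-- pv_equiv track=rewrite | github.com/peiyong-addwater/QAS | search-scripts-legacy/search_LiH_near_cx.py | generate_near_cx_connection_list
-- ===== SOURCE A (Python) =====
-- def generate_near_cx_connection_list(num_qubits:int):
--     forward_list = []
--     backward_list = []
--     connection_list = []
--     for i in range(num_qubits-1):
--         fwd_connection = [i, i+1]
--         bwd_connection = [i+1, i]
--         connection_list.append(fwd_connection)
--         connection_list.append(bwd_connection)
--     return connection_list
-- ===== SOURCE B (Python) =====
-- def generate_near_cx_connection_list(num_qubits: int):
--     # Closed-form over output positions: entry k of the 2*(n-1)-long result is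
--     # [(k+1)//2, k//2 + 1 - k%2]  (even k -> forward pair, odd k -> backward pair).
--     return [[(k + 1) // 2, k // 2 + 1 - k % 2] for k in range(2 * (num_qubits - 1))]
-- ===== Notes on version B (the rewrite author's own statement) =====
-- stated objective: alternative
-- what changed: A loops over qubit indices appending a forward and a backward pair per index; B has no per-qubit loop at all: it computes each output entry directly from its position by a closed-form halving-and-parity formula over the output index range.
import Mathlib
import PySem

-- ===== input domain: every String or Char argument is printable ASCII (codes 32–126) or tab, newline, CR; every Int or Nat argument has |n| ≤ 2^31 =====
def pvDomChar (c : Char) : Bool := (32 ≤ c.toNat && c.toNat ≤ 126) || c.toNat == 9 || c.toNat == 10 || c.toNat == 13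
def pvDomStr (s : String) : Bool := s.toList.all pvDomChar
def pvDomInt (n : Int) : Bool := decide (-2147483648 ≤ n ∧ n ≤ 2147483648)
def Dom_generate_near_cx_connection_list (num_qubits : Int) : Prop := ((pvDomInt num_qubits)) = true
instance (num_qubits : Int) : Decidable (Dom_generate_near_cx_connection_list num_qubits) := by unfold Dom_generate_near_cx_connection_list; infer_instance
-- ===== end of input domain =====

-- B replaces A's per-qubit loop (two appends each step) by a closed-form arithmetic formula
-- giving output entry k directly from its position; same output, same cost.

-- ===== PORT A =====
def generate_near_cx_connection_list (num_qubits : Int) : List (List Int) :=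
  (PySem.List.pyRange 0 (num_qubits - 1) 1).foldl
    (fun connection_list i =>
      (connection_list ++ [[i, i + 1]]) ++ [[i + 1, i]]) []

-- ===== PORT B =====
def generate_near_cx_connection_list_alt (num_qubits : Int) : List (List Int) :=
  (PySem.List.pyRange 0 (2 * (num_qubits - 1)) 1).map
    (fun k => [PySem.Int.floordiv (k + 1) 2,
               PySem.Int.floordiv k 2 + 1 - PySem.Int.mod k 2])

-- ===== PRECONDITION & SPEC =====
def Spec_generate_near_cx_connection_list (num_qubits : Int) (out : List (List Int)) : Prop := out = generate_near_cx_connection_list_alt num_qubits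
instance (num_qubits : Int) (out : List (List Int)) : Decidable (Spec_generate_near_cx_connection_list num_qubits out) := by unfold Spec_generate_near_cx_connection_list; infer_instance

-- ===== CLAIM (what is proved, stated in full; the proofs are below) =====
def Claim_equal_generate_near_cx_connection_list : Prop := ∀ (num_qubits : Int), Dom_generate_near_cx_connection_list num_qubits → Spec_generate_near_cx_connection_list num_qubits (generate_near_cx_connection_list num_qubits)

-- ===== LEMMAS AND PROOFS =====

-- Position formula at the two entries contributed by qubit index i.
theorem pv_pos_even (i : Int) (_h : 0 ≤ i) :
    [PySem.Int.floordiv (2 * i + 1) 2,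
     PySem.Int.floordiv (2 * i) 2 + 1 - PySem.Int.mod (2 * i) 2] = [i, i + 1] := by
  rw [PySem.Int.floordiv_eq_ediv_of_pos (by omega), PySem.Int.floordiv_eq_ediv_of_pos (by omega),
      PySem.Int.mod_eq_emod_of_pos (by omega)]
  simp only [List.cons.injEq, and_true]
  constructor <;> omega

theorem pv_pos_odd (i : Int) (_h : 0 ≤ i) :
    [PySem.Int.floordiv (2 * i + 1 + 1) 2,
     PySem.Int.floordiv (2 * i + 1) 2 + 1 - PySem.Int.mod (2 * i + 1) 2] = [i + 1, i] := by
  rw [PySem.Int.floordiv_eq_ediv_of_pos (by omega), PySem.Int.floordiv_eq_ediv_of_pos (by omega),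
      PySem.Int.mod_eq_emod_of_pos (by omega)]
  simp only [List.cons.injEq, and_true]
  constructor <;> omega

-- Nat induction: A's fold over range m equals B's closed-form map over range 2*m.
theorem pv_main (m : Nat) :
    (PySem.List.pyRange 0 (m : Int) 1).foldl
      (fun connection_list i => (connection_list ++ [[i, i + 1]]) ++ [[i + 1, i]]) []
      = (PySem.List.pyRange 0 (2 * (m : Int)) 1).map
          (fun k => [PySem.Int.floordiv (k + 1) 2,
                     PySem.Int.floordiv k 2 + 1 - PySem.Int.mod k 2]) := by
  induction m with
  | zero => simp [PySem.List.pyRange_one_eq_nil]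
  | succ p ih =>
    have h1 : ((p + 1 : Nat) : Int) = (p : Int) + 1 := by push_cast; ring
    have h2 : (2 : Int) * ((p : Int) + 1) = (2 * (p : Int) + 1) + 1 := by ring
    rw [h1, PySem.List.pyRange_one_succ_right (by positivity),
        h2, PySem.List.pyRange_one_succ_right (by omega),
        PySem.List.pyRange_one_succ_right (by positivity)]
    rw [List.foldl_append, ih]
    simp only [List.foldl_cons, List.foldl_nil, List.map_append, List.map_cons, List.map_nil,
      List.append_assoc]
    rw [pv_pos_even (p : Int) (by positivity), pv_pos_odd (p : Int) (by positivity)]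

-- ===== VERDICT (by name: the statement is the Claim_ definition above) =====
theorem generate_near_cx_connection_list_spec : Claim_equal_generate_near_cx_connection_list := by
  intro n _
  unfold Spec_generate_near_cx_connection_list generate_near_cx_connection_list
    generate_near_cx_connection_list_alt
  by_cases h : n ≤ 1
  · rw [PySem.List.pyRange_one_eq_nil (by omega), PySem.List.pyRange_one_eq_nil (by omega)]
    simp
  · have hm : n - 1 = ((n - 1).toNat : Int) := by omega
    rw [hm]
    exact pv_main (n - 1).toNat
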